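-- pv_equiv track=rewrite | github.com/ftelnov/egeInfo2021 | 20_21.py | second_step_win
-- ===== SOURCE A (Python) =====
-- win_amount = 82  # Необходимо выставить общее число монеток для победы(минимальное необходимое, >=)
--
-- def generate_steps(first, second):
--     return [(first + 1, second), (first, second + 1), (first, second * 4), (first * 4, second)]
--
-- def is_winning(heap):
--     return heap[0] + heap[1] >= win_amount
--
-- def first_step_win(heap):
--     return any(map(is_winning, generate_steps(heap[0], heap[1])))
--
-- def second_step_win(heap):
--     enemy_entries = generate_steps(heap[0], heap[1])
--     for entry in enemy_entries:
--         enemy_steps = generate_steps(entry[0], entry[1])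
--         if any(map(is_winning, enemy_steps)):
--             continue
--         if all(map(first_step_win, enemy_steps)):
--             return True
--     return False
-- ===== SOURCE B (Python) =====
-- win_amount = 82
--
-- def generate_steps(first, second):
--     return [(first + 1, second), (first, second + 1), (first, second * 4), (first * 4, second)]
--
-- def is_winning(heap):
--     return heap[0] + heap[1] >= win_amount
--
-- def can_force(heap, budget, my_turn):
--     # On my turn I need one move that keeps the guarantee; on the enemy's turn
--     # every reply must be non-winning for him and still leave me the guarantee.
--     if my_turn:
--         if budget == 0:
--             return False
--         moves = generate_steps(heap[0], heap[1])
--         if budget == 1: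
--             return any(is_winning(m) for m in moves)
--         return any(can_force(m, budget - 1, False) for m in moves)
--     return all(not is_winning(e) and can_force(e, budget, True)
--                for e in generate_steps(heap[0], heap[1]))
--
-- def second_step_win(heap):
--     return can_force(heap, 2, True)
-- ===== Notes on version B (the rewrite author's own statement) =====
-- stated objective: alternative
-- what changed: Replaced the two hand-unrolled loops (inner any/all over precomputed move lists plus continue/return control flow) with a single recursive game-tree search can_force(heap, budget, my_turn) that alternates any on my turn and all on the enemy's turn, queried with a budget of two of my moves.
import Mathlib
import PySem

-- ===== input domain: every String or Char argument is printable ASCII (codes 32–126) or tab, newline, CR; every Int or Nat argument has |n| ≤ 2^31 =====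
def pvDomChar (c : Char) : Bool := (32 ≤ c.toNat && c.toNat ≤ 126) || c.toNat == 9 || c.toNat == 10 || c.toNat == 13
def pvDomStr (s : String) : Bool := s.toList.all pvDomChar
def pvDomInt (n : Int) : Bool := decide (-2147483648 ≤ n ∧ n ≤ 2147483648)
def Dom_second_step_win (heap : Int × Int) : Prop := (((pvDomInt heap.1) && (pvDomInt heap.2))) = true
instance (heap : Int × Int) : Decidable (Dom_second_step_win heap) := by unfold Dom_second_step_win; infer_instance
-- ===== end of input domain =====

-- B replaces A's two hand-unrolled loops by one recursive any/all game-tree search; objective: alternative decomposition, same cost.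

-- ===== PORT A =====
def pvGenA (first second : Int) : List (Int × Int) :=
  [(first + 1, second), (first, second + 1), (first, second * 4), (first * 4, second)]

def pvWinA (heap : Int × Int) : Bool := decide (heap.1 + heap.2 ≥ 82)

def pvFirstStepWinA (heap : Int × Int) : Bool :=
  ((pvGenA heap.1 heap.2).map pvWinA).any id

-- the 'for entry in enemy_entries' loop with continue / return True
def pvLoopA : List (Int × Int) → Bool
  | [] => false
  | entry :: rest =>
    let enemy_steps := pvGenA entry.1 entry.2
    if (enemy_steps.map pvWinA).any id then pvLoopA rest
    else if (enemy_steps.map pvFirstStepWinA).all id then true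
    else pvLoopA rest

def second_step_win (heap : Int × Int) : Bool :=
  pvLoopA (pvGenA heap.1 heap.2)

-- ===== PORT B =====
def pvGenB (first second : Int) : List (Int × Int) :=
  [(first + 1, second), (first, second + 1), (first, second * 4), (first * 4, second)]

def pvWinB (heap : Int × Int) : Bool := decide (heap.1 + heap.2 ≥ 82)

def pvCanForce (heap : Int × Int) (budget : Nat) (myTurn : Bool) : Bool :=
  if myTurn then
    if budget = 0 then false
    else
      let moves := pvGenB heap.1 heap.2
      if budget = 1 then moves.any pvWinB
      else moves.any (fun m => pvCanForce m (budget - 1) false)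
  else
    (pvGenB heap.1 heap.2).all (fun e => !pvWinB e && pvCanForce e budget true)
termination_by (2 * budget + (if myTurn then 0 else 1), 0)
decreasing_by
  · simp_all; omega
  · simp_all; omega

def second_step_win_alt (heap : Int × Int) : Bool :=
  pvCanForce heap 2 true

-- ===== PRECONDITION & SPEC =====
def Spec_second_step_win (heap : Int × Int) (out : Bool) : Prop := out = second_step_win_alt heap
instance (heap : Int × Int) (out : Bool) : Decidable (Spec_second_step_win heap out) := by unfold Spec_second_step_win; infer_instance

-- ===== CLAIM (what is proved, stated in full; the proofs are below) =====
def Claim_equal_second_step_win : Prop := ∀ (heap : Int × Int), Dom_second_step_win heap → Spec_second_step_win heap (second_step_win heap)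

-- ===== LEMMAS AND PROOFS =====

-- A's loop returns true iff some entry passes both inner tests
theorem pvLoopA_eq_any (l : List (Int × Int)) :
    pvLoopA l = l.any (fun entry =>
      !((pvGenA entry.1 entry.2).map pvWinA).any id &&
        ((pvGenA entry.1 entry.2).map pvFirstStepWinA).all id) := by
  induction l with
  | nil => rfl
  | cons e rest ih =>
    simp only [pvLoopA, List.any_cons]
    split_ifs <;> simp_all

-- ¬(some move wins for the enemy) ∧ (all moves leave me f) = every move is non-winning and leaves me f
theorem pv_not_any_and_all {α : Type} (w f : α → Bool) (l : List α) :
    (!(l.any w) && l.all f) = l.all (fun x => !w x && f x) := by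
  induction l with
  | nil => rfl
  | cons a t ih =>
    cases hw : w a <;> cases hf : f a <;> simp [hw, hf, ← ih]

theorem pvCanForce_one_true (h : Int × Int) :
    pvCanForce h 1 true = (pvGenB h.1 h.2).any pvWinB := by
  rw [pvCanForce]; simp

theorem pvCanForce_one_false (h : Int × Int) :
    pvCanForce h 1 false =
      (pvGenB h.1 h.2).all (fun e => !pvWinB e && pvCanForce e 1 true) := by
  rw [pvCanForce]; simp

theorem pvCanForce_two_true (h : Int × Int) :
    pvCanForce h 2 true = (pvGenB h.1 h.2).any (fun m => pvCanForce m 1 false) := by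
  rw [pvCanForce]; simp

theorem pvFirstStepWinA_eq (h : Int × Int) :
    pvFirstStepWinA h = pvCanForce h 1 true := by
  rw [pvCanForce_one_true]
  simp [pvFirstStepWinA, pvGenA, pvGenB, pvWinA, pvWinB]

-- ===== VERDICT (by name: the statement is the Claim_ definition above) =====
theorem second_step_win_spec : Claim_equal_second_step_win := by
  intro heap _
  show second_step_win heap = second_step_win_alt heap
  rw [second_step_win, second_step_win_alt, pvCanForce_two_true, pvLoopA_eq_any]
  have hg : pvGenA = pvGenB := rfl
  rw [hg]
  congr 1
  funext e
  rw [pvCanForce_one_false, ← pv_not_any_and_all]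
  have hw : pvWinA = pvWinB := rfl
  have hf : pvFirstStepWinA = (fun e => pvCanForce e 1 true) := funext pvFirstStepWinA_eq
  rw [hw, hf]
  simp
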